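-- pv_equiv track=rewrite | github.com/weightsforfun/forCodingTest | trainingForPython/1316.py | discern
-- ===== SOURCE A (Python) =====
-- def discern(word):
--     word=list(word.strip(" "))
--     for i in range(1,len(word)):
--         if(word[i]!=word[i-1]):
--             for j in range(i,len(word)):
--                 if(word[i-1]==word[j]):
--                     return 0
--     return 1
-- ===== SOURCE B (Python) =====
-- def discern(word):
--     # single pass: a character whose run has ended is "closed"; seeing it again => not contiguous
--     closed = set()
--     prev = None
--     for c in word.strip(" "):
--         if c != prev:
--             if c in closed:
--                 return 0
--             if prev is not None:
--                 closed.add(prev)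
--             prev = c
--     return 1
-- ===== Notes on version B (the rewrite author's own statement) =====
-- stated objective: faster
-- what changed: Replaced the quadratic rescan (for every run boundary, scan the rest of the string for the previous character) by a single left-to-right pass maintaining a set of characters whose run has already ended.
import Mathlib
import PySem

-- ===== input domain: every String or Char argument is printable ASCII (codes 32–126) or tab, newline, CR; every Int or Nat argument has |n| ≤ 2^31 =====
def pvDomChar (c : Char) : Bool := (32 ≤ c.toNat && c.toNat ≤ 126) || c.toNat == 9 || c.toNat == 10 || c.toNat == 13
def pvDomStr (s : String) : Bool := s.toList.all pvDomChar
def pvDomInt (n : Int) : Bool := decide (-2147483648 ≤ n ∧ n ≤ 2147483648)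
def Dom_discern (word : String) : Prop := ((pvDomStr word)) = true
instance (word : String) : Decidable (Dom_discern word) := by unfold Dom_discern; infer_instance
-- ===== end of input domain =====

-- B replaces A's quadratic boundary-rescan by one pass with a set of already-closed characters.

-- ===== PORT A =====
-- inner loop: for j in js: if c == w[j]: return 0   (indices are in range, so getD is exact)
def discernInner (w : List Char) (c : Char) : List Nat → Option Int
  | [] => none
  | j :: js => if c = w.getD j ' ' then some 0 else discernInner w c js

-- outer loop: for i in is: if w[i] != w[i-1]: <inner over range(i, len(w))>
def discernOuter (w : List Char) : List Nat → Option Int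
  | [] => none
  | i :: is =>
    if w.getD i ' ' ≠ w.getD (i - 1) ' ' then
      match discernInner w (w.getD (i - 1) ' ') (List.range' i (w.length - i)) with
      | some r => some r
      | none => discernOuter w is
    else discernOuter w is

def discern (word : String) : Int :=
  let w := (PySem.Str.stripChars word " ").toList
  match discernOuter w (List.range' 1 (w.length - 1)) with
  | some r => r
  | none => 1

-- ===== PORT B =====
-- single pass; closed = set of characters whose run has ended, prev = current run's character
def discernAltLoop : List Char → Option Char → PySem.Set Char → Int
  | [], _, _ => 1
  | c :: cs, prev, closed =>
    if some c ≠ prev then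
      if PySem.Set.contains closed c then 0
      else
        match prev with
        | some p => discernAltLoop cs (some c) (PySem.Set.add closed p)
        | none => discernAltLoop cs (some c) closed
    else discernAltLoop cs prev closed

def discern_alt (word : String) : Int :=
  discernAltLoop (PySem.Str.stripChars word " ").toList none PySem.Set.empty

-- ===== PRECONDITION & SPEC =====
def Spec_discern (word : String) (out : Int) : Prop := out = discern_alt word
instance (word : String) (out : Int) : Decidable (Spec_discern word out) := by unfold Spec_discern; infer_instance

-- ===== CLAIM (what is proved, stated in full; the proofs are below) =====
def Claim_equal_discern : Prop := ∀ (word : String), Dom_discern word → Spec_discern word (discern word)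

-- ===== LEMMAS AND PROOFS =====

-- first characters of the maximal runs of w (adjacent dedup)
def runs : List Char → List Char
  | [] => []
  | [a] => [a]
  | a :: b :: t => if a = b then runs (b :: t) else a :: runs (b :: t)

theorem mem_runs (x : Char) : (l : List Char) → (x ∈ runs l ↔ x ∈ l)
  | [] => by simp [runs]
  | [a] => by simp [runs]
  | a :: b :: t => by
    by_cases h : a = b <;>
      simp [runs, h, mem_runs x (b :: t), List.mem_cons]

-- "w is not run-contiguous", in drop-decomposition form
def Bad (w : List Char) : Prop :=
  ∃ k x y t, w.drop k = x :: y :: t ∧ x ≠ y ∧ x ∈ y :: t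

theorem bad_cons (a : Char) (l : List Char) :
    Bad (a :: l) ↔ (∃ y t, l = y :: t ∧ a ≠ y ∧ a ∈ l) ∨ Bad l := by
  constructor
  · rintro ⟨k, x, y, t, hd, hxy, hm⟩
    cases k with
    | zero =>
      simp only [List.drop_zero] at hd
      cases hd
      exact Or.inl ⟨y, t, rfl, hxy, hm⟩
    | succ k => exact Or.inr ⟨k, x, y, t, by simpa using hd, hxy, hm⟩
  · rintro (⟨y, t, rfl, hxy, hm⟩ | ⟨k, x, y, t, hd, hxy, hm⟩)
    · exact ⟨0, a, y, t, by simp, hxy, hm⟩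
    · exact ⟨k + 1, x, y, t, by simpa using hd, hxy, hm⟩

theorem bad_iff_not_nodup : (w : List Char) → (Bad w ↔ ¬ (runs w).Nodup)
  | [] => by
    simp only [runs, List.nodup_nil, not_true, iff_false]
    rintro ⟨k, x, y, t, hd, -, -⟩; simp at hd
  | [a] => by
    simp only [runs, List.nodup_cons, List.not_mem_nil, not_false_iff, List.nodup_nil,
      and_true, not_true, iff_false]
    rintro ⟨k, x, y, t, hd, -, -⟩
    rcases k with _ | k <;> simp at hd
  | a :: b :: t => by
    rw [bad_cons, bad_iff_not_nodup (b :: t), runs]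
    by_cases h : a = b
    · subst h
      rw [if_pos rfl]
      constructor
      · rintro (⟨y, t', heq, hxy, -⟩ | hb)
        · cases heq; exact absurd rfl hxy
        · exact hb
      · exact Or.inr
    · simp only [if_neg h, List.nodup_cons, not_and_or, not_not]
      constructor
      · rintro (⟨y, t', heq, -, hm⟩ | hb)
        · cases heq; exact Or.inl ((mem_runs a (b :: t)).2 hm)
        · exact Or.inr hb
      · rintro (hm | hb)
        · exact Or.inl ⟨b, t, rfl, h, (mem_runs a (b :: t)).1 hm⟩
        · exact Or.inr hb

-- ---- A-side characterisation ----

theorem discernInner_none (w : List Char) (c : Char) (js : List Nat)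
    (h : ∀ j ∈ js, c ≠ w.getD j ' ') : discernInner w c js = none := by
  induction js with
  | nil => rfl
  | cons j js ih =>
    simp only [discernInner, if_neg (h j (List.mem_cons_self ..))]
    exact ih fun j' hj' => h j' (List.mem_cons_of_mem _ hj')

theorem discernInner_some (w : List Char) (c : Char) (js : List Nat)
    (h : ∃ j ∈ js, c = w.getD j ' ') : discernInner w c js = some 0 := by
  induction js with
  | nil => simp at h
  | cons j js ih =>
    rcases h with ⟨j', hj', he⟩
    rcases List.mem_cons.1 hj' with rfl | hmem
    · simp [discernInner, he]
    · simp only [discernInner]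
      split
      · rfl
      · exact ih ⟨j', hmem, he⟩

def OuterHit (w : List Char) (i : Nat) : Prop :=
  w.getD i ' ' ≠ w.getD (i - 1) ' ' ∧
    ∃ j ∈ List.range' i (w.length - i), w.getD (i - 1) ' ' = w.getD j ' '

theorem discernOuter_some (w : List Char) (is : List Nat)
    (h : ∃ i ∈ is, OuterHit w i) : discernOuter w is = some 0 := by
  induction is with
  | nil => simp at h
  | cons i is ih =>
    rcases h with ⟨i', hi', hhit⟩
    rcases List.mem_cons.1 hi' with rfl | hmem
    · rw [discernOuter, if_pos hhit.1, discernInner_some w _ _ hhit.2]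
    · rw [discernOuter]
      split
      · rcases Classical.em (∃ j ∈ List.range' i (w.length - i),
            w.getD (i - 1) ' ' = w.getD j ' ') with hj | hj
        · rw [discernInner_some w _ _ hj]
        · rw [discernInner_none w _ _ (fun j' hj' he => hj ⟨j', hj', he⟩)]
          exact ih ⟨i', hmem, hhit⟩
      · exact ih ⟨i', hmem, hhit⟩

theorem discernOuter_none (w : List Char) (is : List Nat)
    (h : ∀ i ∈ is, ¬ OuterHit w i) : discernOuter w is = none := by
  induction is with
  | nil => rfl
  | cons i is ih =>
    have hni := h i (List.mem_cons_self ..)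
    have ih' := ih fun i' hi' => h i' (List.mem_cons_of_mem _ hi')
    rw [discernOuter]
    split
    · rename_i hb
      rw [discernInner_none w _ _ ?_]
      · exact ih'
      · intro j hj he
        exact hni ⟨hb, j, hj, he⟩
    · exact ih'

-- ∃ i in range(1,len w) with OuterHit  ↔  Bad w
theorem outer_exists_iff_bad (w : List Char) :
    (∃ i ∈ List.range' 1 (w.length - 1), OuterHit w i) ↔ Bad w := by
  constructor
  · rintro ⟨i, hi, hne, j, hj, he⟩
    rw [List.mem_range'_1] at hi hj
    obtain ⟨hi1, hi2⟩ := hi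
    obtain ⟨hj1, hj2⟩ := hj
    have hiw : i < w.length := by omega
    have hjw : j < w.length := by omega
    have hkw : i - 1 < w.length := by omega
    have hstep : i - 1 + 1 = i := by omega
    have hd1 : w.drop (i - 1) = w[i - 1] :: w.drop i := by
      rw [List.drop_eq_getElem_cons hkw, hstep]
    have hd2 : w.drop i = w[i] :: w.drop (i + 1) := List.drop_eq_getElem_cons hiw
    have hne' : w[i] ≠ w[i - 1] := by
      simpa [List.getD_eq_getElem?_getD, List.getElem?_eq_getElem, hiw, hkw] using hne
    have he' : w[i - 1] = w[j] := by
      simpa [List.getD_eq_getElem?_getD, List.getElem?_eq_getElem, hjw, hkw] using he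
    refine ⟨i - 1, w[i - 1], w[i], w.drop (i + 1), by rw [hd1, hd2], Ne.symm hne', ?_⟩
    rw [← hd2, he']
    have hji : j - i < (w.drop i).length := by rw [List.length_drop]; omega
    have hget : (w.drop i)[j - i]'hji = w[j] := by
      rw [List.getElem_drop]
      congr 1
      omega
    rw [← hget]
    exact List.getElem_mem hji
  · rintro ⟨k, x, y, t, hd, hxy, hm⟩
    have hlen : w.length = k + (x :: y :: t).length := by
      have := congrArg List.length hd
      simp only [List.length_drop] at this
      have hk : k ≤ w.length := by
        by_contra hk
        rw [List.drop_eq_nil_of_le (by omega)] at hd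
        simp at hd
      omega
    have hkw : k < w.length := by simp at hlen; omega
    have hk1w : k + 1 < w.length := by simp at hlen; omega
    have hx : w[k] = x := by
      have h0 : (w.drop k)[0]? = some x := by rw [hd]; rfl
      rw [List.getElem?_drop] at h0
      simpa [List.getElem?_eq_getElem hkw] using h0
    have hy : w[k + 1] = y := by
      have h0 : (w.drop k)[1]? = some y := by rw [hd]; rfl
      rw [List.getElem?_drop] at h0
      simpa [List.getElem?_eq_getElem hk1w] using h0
    rcases List.mem_iff_getElem.1 hm with ⟨m, hmlt, hme⟩
    have hmw : k + 1 + m < w.length := by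
      simp at hlen
      simp at hmlt
      omega
    have hdrop : w.drop (k + 1) = y :: t := by
      have := congrArg (List.drop 1) hd
      simpa [List.drop_drop, Nat.add_comm] using this
    have hjx : w[k + 1 + m] = x := by
      have h0 : w[k + 1 + m]? = some x := by
        rw [← List.getElem?_drop, hdrop, List.getElem?_eq_getElem hmlt, hme]
      simpa [List.getElem?_eq_getElem hmw] using h0
    refine ⟨k + 1, ?_, ?_, k + 1 + m, ?_, ?_⟩
    · rw [List.mem_range'_1]; omega
    · simp only [Nat.add_sub_cancel]
      simp only [List.getD_eq_getElem?_getD, List.getElem?_eq_getElem hkw,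
        List.getElem?_eq_getElem hk1w, Option.getD_some, hx, hy]
      exact fun h => hxy (h ▸ rfl)
    · rw [List.mem_range'_1]; omega
    · simp only [Nat.add_sub_cancel]
      simp only [List.getD_eq_getElem?_getD, List.getElem?_eq_getElem hkw,
        List.getElem?_eq_getElem hmw, Option.getD_some, hx, hjx]

theorem discern_eq (word : String) :
    discern word =
      if (runs (PySem.Str.stripChars word " ").toList).Nodup then 1 else 0 := by
  simp only [discern]
  set w := (PySem.Str.stripChars word " ").toList with hw
  by_cases h : (runs w).Nodup
  · rw [if_pos h, discernOuter_none w _ ?_]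
    intro i hi hhit
    exact (bad_iff_not_nodup w).1 ((outer_exists_iff_bad w).1 ⟨i, hi, hhit⟩) h
  · rw [if_neg h,
      discernOuter_some w _ ((outer_exists_iff_bad w).2 ((bad_iff_not_nodup w).2 h))]

-- ---- B-side characterisation ----

theorem runs_cons_head (c : Char) : (cs : List Char) → ∃ t, runs (c :: cs) = c :: t
  | [] => ⟨[], rfl⟩
  | d :: ds => by
    rw [runs]
    by_cases h : c = d
    · subst h
      simpa using runs_cons_head c ds
    · exact ⟨runs (d :: ds), by rw [if_neg h]⟩

theorem discernAltLoop_eq (cs : List Char) : ∀ (p : Char) (closed : PySem.Set Char),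
    discernAltLoop cs (some p) closed =
      if (runs (p :: cs)).Nodup ∧ ∀ x ∈ (runs (p :: cs)).tail, x ∉ closed then 1 else 0 := by
  induction cs with
  | nil =>
    intro p closed
    simp [discernAltLoop, runs]
  | cons c cs ih =>
    intro p closed
    by_cases hcp : c = p
    · subst hcp
      rw [discernAltLoop, if_neg (by simp)]
      rw [ih c closed]
      congr 1
      simp [runs]
    · rw [discernAltLoop, if_pos (by simpa using hcp)]
      have hruns : runs (p :: c :: cs) = p :: runs (c :: cs) := by
        rw [runs, if_neg (fun h => hcp h.symm)]
      obtain ⟨t, ht⟩ := runs_cons_head c cs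
      by_cases hcc : c ∈ closed
      · rw [if_pos (by simpa [PySem.Set.contains] using hcc)]
        rw [if_neg]
        rintro ⟨-, hdisj⟩
        exact hdisj c (by simp [hruns, ht]) hcc
      · rw [if_neg (by simpa [PySem.Set.contains] using hcc)]
        rw [ih c (PySem.Set.add closed p)]
        have hnodup : ∀ x, (x ∉ PySem.Set.add closed p ↔ x ∉ closed ∧ x ≠ p) := by
          intro x
          rw [PySem.Set.mem_add]
          tauto
        congr 1
        rw [hruns, ht]
        simp only [List.nodup_cons, List.tail_cons, List.mem_cons, eq_iff_iff]
        constructor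
        · rintro ⟨⟨hct, hnd⟩, hdisj⟩
          have hdisj' : ∀ x ∈ t, x ∉ closed ∧ x ≠ p :=
            fun x hx => (hnodup x).1 (hdisj x hx)
          refine ⟨⟨?_, hct, hnd⟩, ?_⟩
          · rintro (rfl | hpt)
            · exact hcp rfl
            · exact (hdisj' p hpt).2 rfl
          · rintro x (rfl | hx)
            · exact hcc
            · exact (hdisj' x hx).1
        · rintro ⟨⟨hpm, hct, hnd⟩, hdisj⟩
          refine ⟨⟨hct, hnd⟩, fun x hx => (hnodup x).2 ⟨hdisj x (Or.inr hx), ?_⟩⟩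
          rintro rfl
          exact hpm (Or.inr hx)

theorem discern_alt_eq (word : String) :
    discern_alt word =
      if (runs (PySem.Str.stripChars word " ").toList).Nodup then 1 else 0 := by
  rw [discern_alt]
  set w := (PySem.Str.stripChars word " ").toList with hw
  clear_value w
  cases w with
  | nil => simp [discernAltLoop, runs]
  | cons c cs =>
    rw [discernAltLoop, if_pos (by simp)]
    rw [if_neg (by simp [PySem.Set.empty, PySem.Set.contains])]
    rw [discernAltLoop_eq cs c PySem.Set.empty]
    congr 1
    simp [PySem.Set.empty]

-- ===== VERDICT (by name: the statement is the Claim_ definition above) =====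
theorem discern_spec : Claim_equal_discern := by
  intro word _
  unfold Spec_discern
  rw [discern_eq, discern_alt_eq]
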